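-- pv_equiv track=rewrite | github.com/dashicreative/loomi-ai-agent | ai_agents/comprehensive_schedule_agent.py | _extract_potential_meal_names
-- ===== SOURCE A (Python) =====
-- from typing import Dict, Any, List, Optional, Union, Tuple
--
-- def _extract_potential_meal_names(text: str) -> List[str]:
--     """Extract potential meal names from the entire request for fuzzy matching"""
--     scheduling_words = {
--         'schedule', 'add', 'put', 'plan', 'book', 'set', 'for', 'on', 'at', 'and',
--         'today', 'tomorrow', 'monday', 'tuesday', 'wednesday', 'thursday', 'friday',
--         'saturday', 'sunday', 'next', 'this', 'breakfast', 'lunch', 'dinner', 'snack'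
--     }
--
--     words = text.lower().split()
--     potential_names = []
--     current_phrase = []
--
--     for word in words:
--         clean_word = ''.join(c for c in word if c.isalnum())
--         if clean_word and clean_word not in scheduling_words:
--             current_phrase.append(clean_word)
--         else:
--             if current_phrase:
--                 potential_names.append(' '.join(current_phrase))
--                 current_phrase = []
--
--     if current_phrase:
--         potential_names.append(' '.join(current_phrase))
--
--     return potential_names
-- ===== SOURCE B (Python) =====
-- def _extract_potential_meal_names(text: str):
--     """Extract potential meal names: clean words first, then collect maximal runs of valid words."""
--     scheduling_words = {
--         'schedule', 'add', 'put', 'plan', 'book', 'set', 'for', 'on', 'at', 'and',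
--         'today', 'tomorrow', 'monday', 'tuesday', 'wednesday', 'thursday', 'friday',
--         'saturday', 'sunday', 'next', 'this', 'breakfast', 'lunch', 'dinner', 'snack'
--     }
--     cleaned = [''.join(c for c in w if c.isalnum()) for w in text.lower().split()]
--     ok = [bool(w) and w not in scheduling_words for w in cleaned]
--     names = []
--     i, n = 0, len(cleaned)
--     while i < n:
--         if ok[i]:
--             j = i
--             while j < n and ok[j]:
--                 j += 1
--             names.append(' '.join(cleaned[i:j]))
--             i = j
--         else:
--             i += 1
--     return names
-- ===== Notes on version B (the rewrite author's own statement) =====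
-- stated objective: alternative
-- what changed: Replaced A's single pass with a running phrase-accumulator and manual flushes by a two-phase structure: first clean every word and precompute a validity flag list, then a separate two-index scan that collects each maximal run of valid words and joins it.
import Mathlib
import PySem

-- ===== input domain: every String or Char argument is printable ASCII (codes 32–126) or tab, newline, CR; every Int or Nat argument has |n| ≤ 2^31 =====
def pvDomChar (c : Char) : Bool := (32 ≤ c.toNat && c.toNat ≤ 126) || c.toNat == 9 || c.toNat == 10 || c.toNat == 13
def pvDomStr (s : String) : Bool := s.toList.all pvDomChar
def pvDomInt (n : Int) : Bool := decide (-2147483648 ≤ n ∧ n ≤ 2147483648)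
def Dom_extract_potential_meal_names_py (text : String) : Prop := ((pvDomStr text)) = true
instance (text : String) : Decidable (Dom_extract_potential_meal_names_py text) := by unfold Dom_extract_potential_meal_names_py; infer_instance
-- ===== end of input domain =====

-- B replaces A's accumulator-with-manual-flush loop by a two-phase transform-then-group-runs scan (objective: alternative, same cost).

-- ===== PORT A =====
def pvSched : List (List Char) :=
  ["schedule".toList, "add".toList, "put".toList, "plan".toList, "book".toList,
   "set".toList, "for".toList, "on".toList, "at".toList, "and".toList,
   "today".toList, "tomorrow".toList, "monday".toList, "tuesday".toList,
   "wednesday".toList, "thursday".toList, "friday".toList, "saturday".toList,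
   "sunday".toList, "next".toList, "this".toList, "breakfast".toList,
   "lunch".toList, "dinner".toList, "snack".toList]

def pvCleanA (w : List Char) : List Char := w.filter PySem.Chars.isalnum

-- one iteration of A's for-loop over (potential_names, current_phrase)
def pvStepA (st : List String × List (List Char)) (w : List Char) : List String × List (List Char) :=
  let cw := pvCleanA w
  if !cw.isEmpty && !pvSched.contains cw then (st.1, st.2 ++ [cw])
  else if !st.2.isEmpty then (st.1 ++ [String.ofList (PySem.Chars.join [' '] st.2)], [])
  else st

def extract_potential_meal_names_py (text : String) : List String :=
  let words := PySem.Str.split₀ (PySem.Str.lower text)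
  let st := words.foldl (fun st w => pvStepA st w.toList) ([], [])
  if !st.2.isEmpty then st.1 ++ [String.ofList (PySem.Chars.join [' '] st.2)] else st.1

-- ===== PORT B =====
def pvCleanB (w : List Char) : List Char := w.filter PySem.Chars.isalnum

def pvOk (w : List Char) : Bool := !w.isEmpty && !pvSched.contains w

-- collect maximal runs of ok-words (the two-index while-scan of Source B)
def pvRuns : List (List Char) → List (List (List Char))
  | [] => []
  | w :: rest =>
    if pvOk w then (w :: rest.takeWhile pvOk) :: pvRuns (rest.dropWhile pvOk)
    else pvRuns rest
termination_by l => l.length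
decreasing_by
  · simpa using Nat.lt_succ_of_le (rest.length_dropWhile_le pvOk)
  · simp

def extract_potential_meal_names_py_alt (text : String) : List String :=
  let cleaned := (PySem.Str.split₀ (PySem.Str.lower text)).map (fun w => pvCleanB w.toList)
  (pvRuns cleaned).map (fun run => String.ofList (PySem.Chars.join [' '] run))

-- ===== PRECONDITION & SPEC =====
def Spec_extract_potential_meal_names_py (text : String) (out : List String) : Prop := out = extract_potential_meal_names_py_alt text
instance (text : String) (out : List String) : Decidable (Spec_extract_potential_meal_names_py text out) := by unfold Spec_extract_potential_meal_names_py; infer_instance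

-- ===== CLAIM (what is proved, stated in full; the proofs are below) =====
def Claim_equal_extract_potential_meal_names_py : Prop := ∀ (text : String), Dom_extract_potential_meal_names_py text → Spec_extract_potential_meal_names_py text (extract_potential_meal_names_py text)

-- ===== LEMMAS AND PROOFS =====

-- A's step, expressed on an already-cleaned word
def pvStepC (st : List String × List (List Char)) (cw : List Char) : List String × List (List Char) :=
  if pvOk cw then (st.1, st.2 ++ [cw])
  else if !st.2.isEmpty then (st.1 ++ [String.ofList (PySem.Chars.join [' '] st.2)], [])
  else st

def pvJoinStr (run : List (List Char)) : String := String.ofList (PySem.Chars.join [' '] run)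

-- run decomposition seen from A's loop state
def pvRunsFrom (cur : List (List Char)) : List (List Char) → List (List (List Char))
  | [] => if cur.isEmpty then [] else [cur]
  | w :: rest =>
    if pvOk w then pvRunsFrom (cur ++ [w]) rest
    else (if cur.isEmpty then [] else [cur]) ++ pvRunsFrom [] rest

theorem pv_lemA (ws : List (List Char)) : ∀ (names : List String) (cur : List (List Char)),
    (if !(ws.foldl pvStepC (names, cur)).2.isEmpty
     then (ws.foldl pvStepC (names, cur)).1 ++ [pvJoinStr (ws.foldl pvStepC (names, cur)).2]
     else (ws.foldl pvStepC (names, cur)).1)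
    = names ++ (pvRunsFrom cur ws).map pvJoinStr := by
  induction ws with
  | nil =>
    intro names cur
    cases cur <;> simp [pvRunsFrom]
  | cons w rest ih =>
    intro names cur
    simp only [List.foldl_cons]
    by_cases h : pvOk w = true
    · have := ih names (cur ++ [w])
      simp only [pvStepC, h, if_pos, pvRunsFrom] at *
      simpa [h] using this
    · cases cur with
      | nil =>
        have := ih names []
        simp only [pvStepC, pvRunsFrom, h] at *
        simpa using this
      | cons c cs =>
        have := ih (names ++ [pvJoinStr (c :: cs)]) []
        simp only [pvStepC, pvRunsFrom, h, pvJoinStr] at *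
        simpa using this

theorem pv_lemB (ws : List (List Char)) : ∀ (cur : List (List Char)),
    pvRunsFrom cur ws =
      if cur.isEmpty then pvRuns ws
      else (cur ++ ws.takeWhile pvOk) :: pvRuns (ws.dropWhile pvOk) := by
  induction ws with
  | nil =>
    intro cur
    cases cur <;> simp [pvRunsFrom, pvRuns]
  | cons w rest ih =>
    intro cur
    by_cases h : pvOk w = true
    · rw [pvRunsFrom, if_pos h, ih (cur ++ [w])]
      cases cur <;> simp [pvRuns, h]
    · rw [pvRunsFrom, if_neg h, ih []]
      cases cur <;> simp [pvRuns, h]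

theorem pv_runsFrom_nil (ws : List (List Char)) : pvRunsFrom [] ws = pvRuns ws := by
  simpa using pv_lemB ws []

-- ===== VERDICT (by name: the statement is the Claim_ definition above) =====
theorem extract_potential_meal_names_py_spec : Claim_equal_extract_potential_meal_names_py := by
  intro text _
  show extract_potential_meal_names_py text = extract_potential_meal_names_py_alt text
  unfold extract_potential_meal_names_py extract_potential_meal_names_py_alt
  have hstep : (fun (st : List String × List (List Char)) (w : String) => pvStepA st w.toList)
      = fun st w => pvStepC st (pvCleanB w.toList) := by
    funext st w
    simp [pvStepA, pvStepC, pvOk, pvCleanA, pvCleanB]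
  rw [hstep]
  simp only [← List.foldl_map]
  have h := pv_lemA ((PySem.Str.split₀ (PySem.Str.lower text)).map (fun w => pvCleanB w.toList)) [] []
  rw [pv_runsFrom_nil] at h
  simpa [pvJoinStr] using h
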